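-- pv_equiv track=rewrite | github.com/tavinathanson/taviblock | cli/taviblock.py | generate_block_entries
-- ===== SOURCE A (Python) =====
-- def generate_block_entries(domains):
--     """Generate hosts file entries for IPv4 and IPv6."""
--     entries = []
--     common_subdomains = ["www", "m", "mobile", "login", "app", "api"]
--
--     for domain in domains:
--         domain = domain.strip()
--         if not domain:
--             continue
--         parts = domain.split(".")
--         if len(parts) == 2:  # root domain
--             entries.append(f"127.0.0.1 {domain}")
--             entries.append(f"::1 {domain}")
--             for prefix in common_subdomains:
--                 subdomain = f"{prefix}.{domain}"
--                 entries.append(f"127.0.0.1 {subdomain}")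
--                 entries.append(f"::1 {subdomain}")
--         else:
--             entries.append(f"127.0.0.1 {domain}")
--             entries.append(f"::1 {domain}")
--     return entries
-- ===== SOURCE B (Python) =====
-- def generate_block_entries(domains):
--     """Generate hosts file entries for IPv4 and IPv6."""
--     common_subdomains = ["www", "m", "mobile", "login", "app", "api"]
--     hosts = []
--     for domain in domains:
--         domain = domain.strip()
--         if not domain:
--             continue
--         hosts.append(domain)
--         if len(domain.split(".")) == 2:  # root domain: add common subdomains
--             hosts.extend(f"{prefix}.{domain}" for prefix in common_subdomains)
--     lines = []
--     for host in hosts: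
--         lines.append(f"127.0.0.1 {host}")
--         lines.append(f"::1 {host}")
--     return lines
-- ===== Notes on version B (the rewrite author's own statement) =====
-- stated objective: alternative
-- what changed: Splits A's interleaved decide-and-format loop into two passes: first build the flat list of hostnames to block (domain plus the six common subdomains when it has exactly two dot-parts), then one uniform pass formats each hostname into its IPv4 and IPv6 lines.
import Mathlib
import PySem

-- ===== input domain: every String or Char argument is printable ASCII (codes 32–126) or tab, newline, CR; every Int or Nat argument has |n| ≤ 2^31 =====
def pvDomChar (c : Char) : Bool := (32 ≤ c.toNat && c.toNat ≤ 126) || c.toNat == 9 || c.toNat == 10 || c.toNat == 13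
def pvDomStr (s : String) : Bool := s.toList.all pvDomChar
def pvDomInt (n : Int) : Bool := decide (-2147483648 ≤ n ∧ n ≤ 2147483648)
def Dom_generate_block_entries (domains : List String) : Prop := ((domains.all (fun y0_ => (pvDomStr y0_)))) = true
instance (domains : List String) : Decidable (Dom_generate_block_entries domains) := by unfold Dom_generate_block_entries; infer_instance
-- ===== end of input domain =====

-- B splits A's interleaved decide-and-format loop into a build-hostnames pass followed by a uniform format pass (same output, same cost).


-- ===== PORT A =====
def pvCommonSubdomains : List String := ["www", "m", "mobile", "login", "app", "api"]

-- domain.split(".") has a nonempty separator, so it is exactly PySem.Chars.splitOn on the char list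
def pvSplitDot (domain : String) : List (List Char) :=
  PySem.Chars.splitOn domain.toList ".".toList

def generate_block_entries (domains : List String) : List String :=
  domains.foldl (fun entries domain0 =>
    let domain := PySem.Str.strip domain0
    if domain = "" then entries
    else
      let parts := pvSplitDot domain
      if parts.length = 2 then
        pvCommonSubdomains.foldl (fun e prefix_ =>
          let subdomain := prefix_ ++ "." ++ domain
          e ++ ["127.0.0.1 " ++ subdomain, "::1 " ++ subdomain])
          (entries ++ ["127.0.0.1 " ++ domain, "::1 " ++ domain])
      else
        entries ++ ["127.0.0.1 " ++ domain, "::1 " ++ domain]) []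

-- ===== PORT B =====
def generate_block_entries_alt (domains : List String) : List String :=
  (domains.foldl (fun hs domain0 =>
      let domain := PySem.Str.strip domain0
      if domain = "" then hs
      else if (pvSplitDot domain).length = 2 then
        (hs ++ [domain]) ++ pvCommonSubdomains.map (fun prefix_ => prefix_ ++ "." ++ domain)
      else hs ++ [domain]) []).foldl
    (fun lines host => lines ++ ["127.0.0.1 " ++ host, "::1 " ++ host]) []

-- ===== PRECONDITION & SPEC =====
def Spec_generate_block_entries (domains : List String) (out : List String) : Prop := out = generate_block_entries_alt domains
instance (domains : List String) (out : List String) : Decidable (Spec_generate_block_entries domains out) := by unfold Spec_generate_block_entries; infer_instance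

-- ===== CLAIM (what is proved, stated in full; the proofs are below) =====
def Claim_equal_generate_block_entries : Prop := ∀ (domains : List String), Dom_generate_block_entries domains → Spec_generate_block_entries domains (generate_block_entries domains)

-- ===== LEMMAS AND PROOFS =====

-- per-domain entries produced by A's loop body
def pvEntriesOf (domain0 : String) : List String :=
  let domain := PySem.Str.strip domain0
  if domain = "" then []
  else if (pvSplitDot domain).length = 2 then
    ["127.0.0.1 " ++ domain, "::1 " ++ domain] ++
      pvCommonSubdomains.flatMap (fun p =>
        ["127.0.0.1 " ++ (p ++ "." ++ domain), "::1 " ++ (p ++ "." ++ domain)])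
  else ["127.0.0.1 " ++ domain, "::1 " ++ domain]

-- per-domain hostnames produced by B's first pass
def pvHostsOf (domain0 : String) : List String :=
  let domain := PySem.Str.strip domain0
  if domain = "" then []
  else if (pvSplitDot domain).length = 2 then
    domain :: pvCommonSubdomains.map (fun p => p ++ "." ++ domain)
  else [domain]

lemma pvA_eq_flatMap (domains : List String) :
    generate_block_entries domains = domains.flatMap pvEntriesOf := by
  unfold generate_block_entries
  have hf : (fun (entries : List String) (domain0 : String) =>
      let domain := PySem.Str.strip domain0
      if domain = "" then entries
      else
        let parts := pvSplitDot domain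
        if parts.length = 2 then
          pvCommonSubdomains.foldl (fun e prefix_ =>
            let subdomain := prefix_ ++ "." ++ domain
            e ++ ["127.0.0.1 " ++ subdomain, "::1 " ++ subdomain])
            (entries ++ ["127.0.0.1 " ++ domain, "::1 " ++ domain])
        else
          entries ++ ["127.0.0.1 " ++ domain, "::1 " ++ domain])
      = (fun (entries : List String) (domain0 : String) => entries ++ pvEntriesOf domain0) := by
    funext entries domain0
    simp only [pvEntriesOf]
    split_ifs <;> simp [pvCommonSubdomains, List.foldl]
  rw [hf, PySem.List.foldl_append_eq_flatMap pvEntriesOf domains [], List.nil_append]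

lemma pvB_hosts_eq_flatMap (domains : List String) :
    domains.foldl (fun hs domain0 =>
      let domain := PySem.Str.strip domain0
      if domain = "" then hs
      else if (pvSplitDot domain).length = 2 then
        (hs ++ [domain]) ++ pvCommonSubdomains.map (fun prefix_ => prefix_ ++ "." ++ domain)
      else hs ++ [domain]) [] = domains.flatMap pvHostsOf := by
  have hf : (fun (hs : List String) (domain0 : String) =>
      let domain := PySem.Str.strip domain0
      if domain = "" then hs
      else if (pvSplitDot domain).length = 2 then
        (hs ++ [domain]) ++ pvCommonSubdomains.map (fun prefix_ => prefix_ ++ "." ++ domain)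
      else hs ++ [domain])
      = (fun (hs : List String) (domain0 : String) => hs ++ pvHostsOf domain0) := by
    funext hs domain0
    simp only [pvHostsOf]
    split_ifs <;> simp
  rw [hf, PySem.List.foldl_append_eq_flatMap pvHostsOf domains [], List.nil_append]

lemma pvEntries_eq_hosts_flatMap (d : String) :
    pvEntriesOf d = (pvHostsOf d).flatMap (fun h => ["127.0.0.1 " ++ h, "::1 " ++ h]) := by
  simp only [pvEntriesOf, pvHostsOf]
  split_ifs <;> simp [pvCommonSubdomains]

lemma pvAlt_eq (domains : List String) :
    generate_block_entries_alt domains = domains.flatMap pvEntriesOf := by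
  unfold generate_block_entries_alt
  rw [pvB_hosts_eq_flatMap,
      PySem.List.foldl_append_eq_flatMap (fun h => ["127.0.0.1 " ++ h, "::1 " ++ h]) _ [],
      List.nil_append, List.flatMap_assoc]
  exact List.flatMap_congr (fun d _ => (pvEntries_eq_hosts_flatMap d).symm)

-- ===== VERDICT (by name: the statement is the Claim_ definition above) =====
theorem generate_block_entries_spec : Claim_equal_generate_block_entries := by
  intro domains _
  unfold Spec_generate_block_entries
  rw [pvA_eq_flatMap, pvAlt_eq]
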